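-- pv_equiv track=rewrite | github.com/Nandan-D14/Tourism | backend/tourist_agent/tools/place_tools.py | _place_category
-- ===== SOURCE A (Python) =====
-- def _place_category(name: str) -> str:
--     """Infers a broad place category from the place name."""
--
--     lower_name = name.lower()
--     if any(token in lower_name for token in ("falls", "waterfall", "abbi", "cascade")):
--         return "waterfall"
--     if any(token in lower_name for token in ("temple", "mandir", "devasthana", "gudi")):
--         return "temple"
--     if any(token in lower_name for token in ("fort", "palace", "mahal")):
--         return "heritage"
--     if any(token in lower_name for token in ("sanctuary", "reserve", "wildlife", "zoo", "park")):
--         return "wildlife"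
--     if any(token in lower_name for token in ("peak", "hill", "trek", "trail", "betta", "giri")):
--         return "trek"
--     if any(token in lower_name for token in ("beach", "lake", "river", "ghat", "viewpoint")):
--         return "scenic"
--     if any(token in lower_name for token in ("market", "bazaar", "street", "food")):
--         return "food"
--     if any(token in lower_name for token in ("museum", "gallery", "memorial")):
--         return "culture"
--     return "landmark"
-- ===== SOURCE B (Python) =====
-- _CATS = ("waterfall", "temple", "heritage", "wildlife", "trek", "scenic", "food", "culture")
--
-- # token -> priority (index into _CATS); first-match priority of the original chain
-- _TOKEN_PRIO = {
--     "falls": 0, "waterfall": 0, "abbi": 0, "cascade": 0,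
--     "temple": 1, "mandir": 1, "devasthana": 1, "gudi": 1,
--     "fort": 2, "palace": 2, "mahal": 2,
--     "sanctuary": 3, "reserve": 3, "wildlife": 3, "zoo": 3, "park": 3,
--     "peak": 4, "hill": 4, "trek": 4, "trail": 4, "betta": 4, "giri": 4,
--     "beach": 5, "lake": 5, "river": 5, "ghat": 5, "viewpoint": 5,
--     "market": 6, "bazaar": 6, "street": 6, "food": 6,
--     "museum": 7, "gallery": 7, "memorial": 7,
-- }
--
-- _LENGTHS = (3, 4, 5, 6, 7, 8, 9, 10)  # the distinct token lengths
--
--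
-- def _place_category(name: str) -> str:
--     """Infers a broad place category from the place name."""
--     lower_name = name.lower()
--     best = 8
--     for i in range(len(lower_name)):
--         for width in _LENGTHS:
--             prio = _TOKEN_PRIO.get(lower_name[i : i + width], 8)
--             if prio < best:
--                 best = prio
--     return _CATS[best] if best < 8 else "landmark"
-- ===== Notes on version B (the rewrite author's own statement) =====
-- stated objective: alternative
-- what changed: Instead of searching the name once per keyword, B slides a window over the lowered name, looks every window of a token length up in a single token-to-priority dictionary, and returns the category of the minimal priority seen (8 = no match = landmark).
import Mathlib
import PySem

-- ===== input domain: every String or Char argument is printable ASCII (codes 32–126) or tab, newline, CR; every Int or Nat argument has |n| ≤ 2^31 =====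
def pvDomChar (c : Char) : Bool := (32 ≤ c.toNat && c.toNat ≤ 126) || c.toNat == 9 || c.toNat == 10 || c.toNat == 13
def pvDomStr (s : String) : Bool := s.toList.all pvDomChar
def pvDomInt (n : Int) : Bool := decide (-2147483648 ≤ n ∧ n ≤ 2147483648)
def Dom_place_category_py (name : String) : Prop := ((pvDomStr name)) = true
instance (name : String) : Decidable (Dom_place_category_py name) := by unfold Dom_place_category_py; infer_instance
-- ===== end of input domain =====

-- B replaces A's per-token substring searches by a sliding-window scan over the name: every
-- window of a token length is looked up in a token→priority dictionary and the minimal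
-- priority wins (same priority order, same default); objective: alternative.

-- ===== PORT A =====
def place_category_py (name : String) : String :=
  let lower_name := PySem.Str.lower name
  if ["falls", "waterfall", "abbi", "cascade"].any (fun token => PySem.Str.isIn token lower_name) then "waterfall"
  else if ["temple", "mandir", "devasthana", "gudi"].any (fun token => PySem.Str.isIn token lower_name) then "temple"
  else if ["fort", "palace", "mahal"].any (fun token => PySem.Str.isIn token lower_name) then "heritage"
  else if ["sanctuary", "reserve", "wildlife", "zoo", "park"].any (fun token => PySem.Str.isIn token lower_name) then "wildlife"
  else if ["peak", "hill", "trek", "trail", "betta", "giri"].any (fun token => PySem.Str.isIn token lower_name) then "trek"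
  else if ["beach", "lake", "river", "ghat", "viewpoint"].any (fun token => PySem.Str.isIn token lower_name) then "scenic"
  else if ["market", "bazaar", "street", "food"].any (fun token => PySem.Str.isIn token lower_name) then "food"
  else if ["museum", "gallery", "memorial"].any (fun token => PySem.Str.isIn token lower_name) then "culture"
  else "landmark"

-- ===== PORT B =====
def pvCats : List String :=
  ["waterfall", "temple", "heritage", "wildlife", "trek", "scenic", "food", "culture"]

-- _TOKEN_PRIO: token (as its char list) → priority; a Python dict literal with distinct keys
def pvTokenPrio : PySem.Dict (List Char) Nat := PySem.Dict.mk
  [("falls".toList, 0), ("waterfall".toList, 0), ("abbi".toList, 0), ("cascade".toList, 0),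
   ("temple".toList, 1), ("mandir".toList, 1), ("devasthana".toList, 1), ("gudi".toList, 1),
   ("fort".toList, 2), ("palace".toList, 2), ("mahal".toList, 2),
   ("sanctuary".toList, 3), ("reserve".toList, 3), ("wildlife".toList, 3), ("zoo".toList, 3), ("park".toList, 3),
   ("peak".toList, 4), ("hill".toList, 4), ("trek".toList, 4), ("trail".toList, 4), ("betta".toList, 4), ("giri".toList, 4),
   ("beach".toList, 5), ("lake".toList, 5), ("river".toList, 5), ("ghat".toList, 5), ("viewpoint".toList, 5),
   ("market".toList, 6), ("bazaar".toList, 6), ("street".toList, 6), ("food".toList, 6),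
   ("museum".toList, 7), ("gallery".toList, 7), ("memorial".toList, 7)]

def pvLengths : List Nat := [3, 4, 5, 6, 7, 8, 9, 10]

-- the window lookup lower_name[i:i+width] → priority (strings handled as their char lists; exact)
def pvPrioAt (s : List Char) (i width : Nat) : Nat :=
  pvTokenPrio.getD (PySem.List.slice s (some (i : Int)) (some ((i : Int) + (width : Int)))) 8

def pvInner (s : List Char) (i : Nat) (b : Nat) : Nat :=
  pvLengths.foldl (fun best width =>
    let prio := pvPrioAt s i width
    if prio < best then prio else best) b

def pvBest (s : List Char) : Nat :=
  (List.range s.length).foldl (fun best i => pvInner s i best) 8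

def place_category_py_alt (name : String) : String :=
  let s := PySem.Chars.lower name.toList
  let best := pvBest s
  if best < 8 then pvCats.getD best "landmark" else "landmark"

-- ===== PRECONDITION & SPEC =====
def Spec_place_category_py (name : String) (out : String) : Prop := out = place_category_py_alt name
instance (name : String) (out : String) : Decidable (Spec_place_category_py name out) := by unfold Spec_place_category_py; infer_instance

-- ===== CLAIM (what is proved, stated in full; the proofs are below) =====
def Claim_equal_place_category_py : Prop := ∀ (name : String), Dom_place_category_py name → Spec_place_category_py name (place_category_py name)

-- ===== LEMMAS AND PROOFS =====

-- category token lists of A, in priority order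
def pvToks : Nat → List String
  | 0 => ["falls", "waterfall", "abbi", "cascade"]
  | 1 => ["temple", "mandir", "devasthana", "gudi"]
  | 2 => ["fort", "palace", "mahal"]
  | 3 => ["sanctuary", "reserve", "wildlife", "zoo", "park"]
  | 4 => ["peak", "hill", "trek", "trail", "betta", "giri"]
  | 5 => ["beach", "lake", "river", "ghat", "viewpoint"]
  | 6 => ["market", "bazaar", "street", "food"]
  | 7 => ["museum", "gallery", "memorial"]
  | _ => []

def pvMatched (s : List Char) (p : Nat) : Bool :=
  (pvToks p).any (fun t => PySem.Chars.isIn t.toList s)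

-- generic facts about a running-minimum fold
theorem pvFoldMin_le_init (g : Nat → Nat) (l : List Nat) (b : Nat) :
    l.foldl (fun best w => let p := g w; if p < best then p else best) b ≤ b := by
  induction l generalizing b with
  | nil => simp
  | cons x t ih =>
    simp only [List.foldl_cons]
    exact le_trans (ih _) (by split <;> omega)

theorem pvFoldMin_le (g : Nat → Nat) (l : List Nat) (b w : Nat) (hw : w ∈ l) :
    l.foldl (fun best w => let p := g w; if p < best then p else best) b ≤ g w := by
  induction l generalizing b with
  | nil => cases hw
  | cons x t ih =>
    simp only [List.foldl_cons]
    rcases List.mem_cons.mp hw with rfl | hw'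
    · exact le_trans (pvFoldMin_le_init g t _) (by split <;> omega)
    · exact ih _ hw'

theorem pvLe_foldMin (g : Nat → Nat) (l : List Nat) (b p : Nat) (hb : p ≤ b)
    (h : ∀ w ∈ l, p ≤ g w) :
    p ≤ l.foldl (fun best w => let p := g w; if p < best then p else best) b := by
  induction l generalizing b with
  | nil => simpa
  | cons x t ih =>
    simp only [List.foldl_cons]
    refine ih _ ?_ (fun w hw => h w (List.mem_cons_of_mem _ hw))
    have := h x (List.mem_cons_self ..)
    split <;> omega

theorem pvInner_le_init (s : List Char) (i b : Nat) : pvInner s i b ≤ b :=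
  pvFoldMin_le_init (pvPrioAt s i) pvLengths b

theorem pvInner_le (s : List Char) (i b w : Nat) (hw : w ∈ pvLengths) :
    pvInner s i b ≤ pvPrioAt s i w :=
  pvFoldMin_le (pvPrioAt s i) pvLengths b w hw

theorem le_pvInner (s : List Char) (i b p : Nat) (hb : p ≤ b)
    (h : ∀ w ∈ pvLengths, p ≤ pvPrioAt s i w) : p ≤ pvInner s i b :=
  pvLe_foldMin (pvPrioAt s i) pvLengths b p hb h

theorem pvFoldInner_le_init (s : List Char) (l : List Nat) (b : Nat) :
    l.foldl (fun best i => pvInner s i best) b ≤ b := by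
  induction l generalizing b with
  | nil => simp
  | cons x t ih => exact le_trans (ih _) (pvInner_le_init s x b)

theorem pvFoldInner_le (s : List Char) (l : List Nat) (b i w : Nat) (hi : i ∈ l)
    (hw : w ∈ pvLengths) :
    l.foldl (fun best i => pvInner s i best) b ≤ pvPrioAt s i w := by
  induction l generalizing b with
  | nil => cases hi
  | cons x t ih =>
    simp only [List.foldl_cons]
    rcases List.mem_cons.mp hi with rfl | hi'
    · exact le_trans (pvFoldInner_le_init s t _) (pvInner_le s i b w hw)
    · exact ih _ hi'

theorem pvLe_foldInner (s : List Char) (l : List Nat) (b p : Nat) (hb : p ≤ b)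
    (h : ∀ i ∈ l, ∀ w ∈ pvLengths, p ≤ pvPrioAt s i w) :
    p ≤ l.foldl (fun best i => pvInner s i best) b := by
  induction l generalizing b with
  | nil => simpa
  | cons x t ih =>
    simp only [List.foldl_cons]
    exact ih _ (le_pvInner s x b p hb (h x (List.mem_cons_self ..)))
      (fun i hi => h i (List.mem_cons_of_mem _ hi))

theorem pvBest_le (s : List Char) (i w : Nat) (hi : i < s.length) (hw : w ∈ pvLengths) :
    pvBest s ≤ pvPrioAt s i w :=
  pvFoldInner_le s (List.range s.length) 8 i w (List.mem_range.mpr hi) hw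

theorem pvBest_le_eight (s : List Char) : pvBest s ≤ 8 :=
  pvFoldInner_le_init s (List.range s.length) 8

theorem le_pvBest (s : List Char) (p : Nat) (hp : p ≤ 8)
    (h : ∀ i < s.length, ∀ w ∈ pvLengths, p ≤ pvPrioAt s i w) : p ≤ pvBest s :=
  pvLe_foldInner s (List.range s.length) 8 p hp
    (fun i hi => h i (List.mem_range.mp hi))

-- every entry of the token dictionary names a token of its own category list
theorem pvTable_sound : ∀ pr ∈ pvTokenPrio.items, ∃ t ∈ pvToks pr.2, t.toList = pr.1 := by
  decide

-- every category token is a nonempty dictionary key of its own priority, of a scanned width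
theorem pvToks_complete : ∀ p < 8, ∀ t ∈ pvToks p,
    t.toList ≠ [] ∧ t.toList.length ∈ pvLengths ∧ pvTokenPrio.getD t.toList 8 = p := by
  decide

-- a window slice that occurs in the dictionary is a substring of s
theorem pvIsIn_of_slice_eq (s t : List Char) (i w : Nat)
    (h : PySem.List.slice s (some (i : Int)) (some ((i : Int) + (w : Int))) = t) :
    PySem.Chars.isIn t s = true := by
  rw [PySem.List.slice_natCast_add] at h
  rw [PySem.Chars.isIn_iff_infix, ← h]
  exact (List.take_prefix _ _).isInfix.trans (List.drop_suffix _ _).isInfix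

theorem pvMatched_of_prio (s : List Char) (i w q : Nat) (hq : q < 8)
    (h : pvPrioAt s i w = q) : pvMatched s q = true := by
  unfold pvPrioAt at h
  rw [PySem.Dict.getD_eq_get?_getD] at h
  rcases hg : pvTokenPrio.get? (PySem.List.slice s (some (i : Int)) (some ((i : Int) + (w : Int)))) with _ | v
  · rw [hg] at h; simp at h; omega
  · rw [hg] at h; simp at h; subst h
    obtain ⟨t, ht, htk⟩ := pvTable_sound _ (PySem.Dict.mem_items_of_get?_eq_some _ hg)
    exact List.any_eq_true.mpr ⟨t, ht, pvIsIn_of_slice_eq s t.toList i w (htk ▸ rfl)⟩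

theorem pvHit_of_matched (s : List Char) (p : Nat) (hp : p < 8)
    (h : pvMatched s p = true) : ∃ i < s.length, ∃ w ∈ pvLengths, pvPrioAt s i w = p := by
  obtain ⟨t, ht, hin⟩ := List.any_eq_true.mp h
  obtain ⟨hne, hlen, hprio⟩ := pvToks_complete p hp t ht
  obtain ⟨j, hpre⟩ := (PySem.Chars.exists_prefix_drop_iff_isIn t.toList s).mpr hin
  have hj : j < s.length := by
    by_contra hj
    have : s.drop j = [] := List.drop_eq_nil_of_le (by omega)
    rw [this] at hpre
    exact hne (List.prefix_nil.mp hpre)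
  refine ⟨j, hj, t.toList.length, hlen, ?_⟩
  unfold pvPrioAt
  rw [PySem.List.slice_natCast_add, (List.prefix_iff_eq_take.mp hpre).symm, hprio]

theorem pvBest_eq (s : List Char) (p : Nat) (hp : p < 8) (hm : pvMatched s p = true)
    (hprev : ∀ q < p, pvMatched s q = false) : pvBest s = p := by
  obtain ⟨i, hi, w, hw, hia⟩ := pvHit_of_matched s p hp hm
  refine le_antisymm (hia ▸ pvBest_le s i w hi hw) (le_pvBest s p (by omega) ?_)
  intro i hi w hw
  by_cases hq : pvPrioAt s i w < 8
  · have := pvMatched_of_prio s i w _ hq rfl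
    by_contra hlt
    have := hprev (pvPrioAt s i w) (by omega)
    rw [this] at *
    simp_all
  · omega

theorem pvBest_eq_eight (s : List Char) (h : ∀ q < 8, pvMatched s q = false) :
    pvBest s = 8 := by
  refine le_antisymm (pvBest_le_eight s) (le_pvBest s 8 le_rfl ?_)
  intro i hi w hw
  by_cases hq : pvPrioAt s i w < 8
  · have hm := pvMatched_of_prio s i w _ hq rfl
    rw [h _ hq] at hm; cases hm
  · omega

-- A's branch-p condition IS pvMatched on the lowered char list
theorem pvCond_eq (name : String) (p : Nat) :
    ((pvToks p).any (fun token => PySem.Str.isIn token (PySem.Str.lower name)))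
      = pvMatched (PySem.Chars.lower name.toList) p := by
  unfold pvMatched
  congr 1
  funext t
  simp [PySem.Str.isIn]

-- ===== VERDICT (by name: the statement is the Claim_ definition above) =====
theorem place_category_py_spec : Claim_equal_place_category_py := by
  intro name _
  unfold Spec_place_category_py place_category_py place_category_py_alt
  set s := PySem.Chars.lower name.toList
  have hc : ∀ p, ((pvToks p).any (fun token => PySem.Str.isIn token (PySem.Str.lower name))) = pvMatched s p :=
    fun p => pvCond_eq name p
  have h0 := hc 0; have h1 := hc 1; have h2 := hc 2; have h3 := hc 3
  have h4 := hc 4; have h5 := hc 5; have h6 := hc 6; have h7 := hc 7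
  simp only [pvToks] at h0 h1 h2 h3 h4 h5 h6 h7
  simp only [h0, h1, h2, h3, h4, h5, h6, h7]
  by_cases m0 : pvMatched s 0 = true
  · rw [pvBest_eq s 0 (by omega) m0 (by omega)]; simp [m0, pvCats]
  · by_cases m1 : pvMatched s 1 = true
    · rw [pvBest_eq s 1 (by omega) m1 (by intro q hq; interval_cases q; simp_all)]
      simp [m0, m1, pvCats]
    · by_cases m2 : pvMatched s 2 = true
      · rw [pvBest_eq s 2 (by omega) m2 (by intro q hq; interval_cases q <;> simp_all)]
        simp [m0, m1, m2, pvCats]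
      · by_cases m3 : pvMatched s 3 = true
        · rw [pvBest_eq s 3 (by omega) m3 (by intro q hq; interval_cases q <;> simp_all)]
          simp [m0, m1, m2, m3, pvCats]
        · by_cases m4 : pvMatched s 4 = true
          · rw [pvBest_eq s 4 (by omega) m4 (by intro q hq; interval_cases q <;> simp_all)]
            simp [m0, m1, m2, m3, m4, pvCats]
          · by_cases m5 : pvMatched s 5 = true
            · rw [pvBest_eq s 5 (by omega) m5 (by intro q hq; interval_cases q <;> simp_all)]
              simp [m0, m1, m2, m3, m4, m5, pvCats]
            · by_cases m6 : pvMatched s 6 = true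
              · rw [pvBest_eq s 6 (by omega) m6 (by intro q hq; interval_cases q <;> simp_all)]
                simp [m0, m1, m2, m3, m4, m5, m6, pvCats]
              · by_cases m7 : pvMatched s 7 = true
                · rw [pvBest_eq s 7 (by omega) m7 (by intro q hq; interval_cases q <;> simp_all)]
                  simp [m0, m1, m2, m3, m4, m5, m6, m7, pvCats]
                · rw [pvBest_eq_eight s (by intro q hq; interval_cases q <;> simp_all)]
                  simp [m0, m1, m2, m3, m4, m5, m6, m7]
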